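-- pv_equiv track=rewrite | github.com/w00ye0l/TIL | Programmers/Python/모의고사.py | solution
-- ===== SOURCE A (Python) =====
-- def solution(answers):
--     answer = []
--
--     u1 = [1, 2, 3, 4, 5] * 2000
--     u2 = [2, 1, 2, 3, 2, 4, 2, 5] * 1250
--     u3 = [3, 3, 1, 1, 2, 2, 4, 4, 5, 5] * 1000
--
--     cnt = [0, 0, 0]
--     for i in range(len(answers)):
--         if u1[i] == answers[i]:
--             cnt[0] += 1
--         if u2[i] == answers[i]:
--             cnt[1] += 1
--         if u3[i] == answers[i]:
--             cnt[2] += 1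
--
--     for i in range(3):
--         if cnt[i] == max(cnt):
--             answer.append(i + 1)
--
--     return answer
-- ===== SOURCE B (Python) =====
-- def solution(answers):
--     pats = ([1, 2, 3, 4, 5] * 8,
--             [2, 1, 2, 3, 2, 4, 2, 5] * 5,
--             [3, 3, 1, 1, 2, 2, 4, 4, 5, 5] * 4)
--     # Precompute a 40-entry (lcm of the periods) lookup table: for each
--     # position-in-cycle j, a dict mapping an answer value to the triple of
--     # per-supposer score increments at that position.
--     table = []
--     for j in range(40):
--         d = {}
--         for s in range(3):
--             key = pats[s][j]
--             inc = d.get(key, (0, 0, 0))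
--             inc = tuple(inc[t] + (1 if t == s else 0) for t in range(3))
--             d[key] = inc
--         table.append(d)
--     c0 = c1 = c2 = 0
--     j = 0
--     for a in answers:
--         inc = table[j].get(a)
--         if inc is not None:
--             c0 += inc[0]; c1 += inc[1]; c2 += inc[2]
--         j = 0 if j == 39 else j + 1
--     cnt = [c0, c1, c2]
--     m = max(cnt)
--     return [s + 1 for s in range(3) if cnt[s] == m]
-- ===== Notes on version B (the rewrite author's own statement) =====
-- stated objective: alternative
-- what changed: A materializes three 10000-element pattern lists and compares every answer against all three inside one indexed loop; B instead precomputes a 40-entry (lcm of the three periods) lookup table of dicts mapping an answer value at each cycle position to a triple of per-supposer score increments, then does a single table-driven pass over answers with a cycling position counter, and finally picks the maxima.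
import Mathlib
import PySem

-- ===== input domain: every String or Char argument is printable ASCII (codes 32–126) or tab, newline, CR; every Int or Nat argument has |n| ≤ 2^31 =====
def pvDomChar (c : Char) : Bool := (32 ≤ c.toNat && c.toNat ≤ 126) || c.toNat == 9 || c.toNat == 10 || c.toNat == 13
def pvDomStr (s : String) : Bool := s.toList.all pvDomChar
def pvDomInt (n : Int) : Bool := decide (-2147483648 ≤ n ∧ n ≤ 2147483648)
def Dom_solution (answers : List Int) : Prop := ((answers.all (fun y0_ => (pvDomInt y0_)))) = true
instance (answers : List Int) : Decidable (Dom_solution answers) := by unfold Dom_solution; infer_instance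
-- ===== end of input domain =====

-- B replaces A's per-element comparison against three materialized 10000-long pattern
-- lists by a precomputed 40-entry (lcm-of-periods) lookup table mapping position-in-cycle
-- and answer value to a triple of score increments, scanned in one pass (objective: alternative).

-- ===== PORT A =====
def solution (answers : List Int) : List Int :=
  let u1 : List Int := (List.replicate 2000 [1, 2, 3, 4, 5]).flatten
  let u2 : List Int := (List.replicate 1250 [2, 1, 2, 3, 2, 4, 2, 5]).flatten
  let u3 : List Int := (List.replicate 1000 [3, 3, 1, 1, 2, 2, 4, 4, 5, 5]).flatten
  let cnt : Int × Int × Int :=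
    (PySem.List.pyRange 0 (answers.length : Int) 1).foldl
      (fun c i =>
        let c0 := if PySem.List.pyGetD u1 i 0 == PySem.List.pyGetD answers i 0 then c.1 + 1 else c.1
        let c1 := if PySem.List.pyGetD u2 i 0 == PySem.List.pyGetD answers i 0 then c.2.1 + 1 else c.2.1
        let c2 := if PySem.List.pyGetD u3 i 0 == PySem.List.pyGetD answers i 0 then c.2.2 + 1 else c.2.2
        (c0, c1, c2)) (0, 0, 0)
  let cntL : List Int := [cnt.1, cnt.2.1, cnt.2.2]
  (PySem.List.pyRange 0 3 1).foldl
    (fun ans i =>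
      if PySem.List.pyGetD cntL i 0 == (PySem.List.max? cntL (fun x => x)).getD 0
      then ans ++ [i + 1] else ans) []

-- ===== PORT B =====
-- pats = ([1,2,3,4,5]*8, [2,1,2,3,2,4,2,5]*5, [3,3,1,1,2,2,4,4,5,5]*4)
def pvPats : List (List Int) :=
  [(List.replicate 8 [1, 2, 3, 4, 5]).flatten,
   (List.replicate 5 [2, 1, 2, 3, 2, 4, 2, 5]).flatten,
   (List.replicate 4 [3, 3, 1, 1, 2, 2, 4, 4, 5, 5]).flatten]

-- the table-building loop: for j in range(40): d = {}; for s in range(3): … ; table.append(d)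
def pvTable : List (PySem.Dict Int (Int × Int × Int)) :=
  (PySem.List.pyRange 0 40 1).foldl
    (fun t j =>
      t ++ [(PySem.List.pyRange 0 3 1).foldl
        (fun d s =>
          let key := PySem.List.pyGetD (PySem.List.pyGetD pvPats s []) j 0
          let inc := d.getD key (0, 0, 0)
          -- inc = tuple(inc[t] + (1 if t == s else 0) for t in range(3)); d[key] = inc
          d.insert key
            (inc.1 + (if (0 : Int) == s then 1 else 0),
             inc.2.1 + (if (1 : Int) == s then 1 else 0),
             inc.2.2 + (if (2 : Int) == s then 1 else 0)))
        PySem.Dict.empty]) []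

-- one step of the scan: inc = table[j].get(a); if inc is not None: add; j = 0 if j == 39 else j + 1
def pvStep (st : (Int × Int × Int) × Int) (a : Int) : (Int × Int × Int) × Int :=
  let c := st.1
  let j := st.2
  let c := match (PySem.List.pyGetD pvTable j PySem.Dict.empty).get? a with
    | none => c
    | some inc => (c.1 + inc.1, c.2.1 + inc.2.1, c.2.2 + inc.2.2)
  (c, if j == (39 : Int) then 0 else j + 1)

def solution_alt (answers : List Int) : List Int :=
  let st := answers.foldl pvStep ((0, 0, 0), 0)
  let cnt : List Int := [st.1.1, st.1.2.1, st.1.2.2]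
  let m : Int := (PySem.List.max? cnt (fun x => x)).getD 0
  ((PySem.List.pyRange 0 3 1).filter (fun s => PySem.List.pyGetD cnt s 0 == m)).map (fun s => s + 1)

-- ===== PRECONDITION & SPEC =====
-- Pre_ excludes answers longer than 10000, on which A raises IndexError (the pattern lists end).
def Pre_solution (answers : List Int) : Prop := answers.length ≤ 10000
instance (answers : List Int) : Decidable (Pre_solution answers) := by unfold Pre_solution; infer_instance
def pvWitness_solution : List Int := ([1, 2, 3, 4, 5, 1, 1] : List Int)

def Spec_solution (answers : List Int) (out : List Int) : Prop := out = solution_alt answers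
instance (answers : List Int) (out : List Int) : Decidable (Spec_solution answers out) := by unfold Spec_solution; infer_instance

-- ===== CLAIM (what is proved, stated in full; the proofs are below) =====
def Claim_equal_solution : Prop := ∀ (answers : List Int), Dom_solution answers → Pre_solution answers → Spec_solution answers (solution answers)

-- ===== LEMMAS AND PROOFS =====

-- the count of matches of `t` against the infinite periodic extension of `base`, starting at absolute position k
def Mcnt (base : List Int) : Nat → List Int → Int
  | _, [] => 0
  | k, a :: t => (if base.getD (k % base.length) 0 == a then 1 else 0) + Mcnt base (k + 1) t

-- getD of a flattened replicate is getD of the base at the index mod the base length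
theorem getD_flatten_replicate (base : List Int) (d : Int) :
    ∀ (m k : Nat), k < m * base.length →
      ((List.replicate m base).flatten).getD k d = base.getD (k % base.length) d := by
  intro m
  induction m with
  | zero => intro k hk; omega
  | succ m ih =>
    intro k hk
    rw [List.replicate_succ, List.flatten_cons]
    by_cases hlt : k < base.length
    · rw [List.getD_append _ _ _ _ hlt, Nat.mod_eq_of_lt hlt]
    · rw [Nat.not_lt] at hlt
      rw [List.getD_append_right _ _ _ _ hlt, Nat.mod_eq_sub_mod hlt]
      have hm : (m + 1) * base.length = m * base.length + base.length := by ring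
      exact ih (k - base.length) (by omega)

-- the interleaved triple-counter fold splits into three independent folds
theorem foldl_triple_split (F G H : Int → Bool) :
    ∀ (l : List Int) (x y z : Int),
      l.foldl (fun (c : Int × Int × Int) i =>
        (if F i then c.1 + 1 else c.1,
         if G i then c.2.1 + 1 else c.2.1,
         if H i then c.2.2 + 1 else c.2.2)) (x, y, z)
      = (l.foldl (fun s i => if F i then s + 1 else s) x,
         l.foldl (fun s i => if G i then s + 1 else s) y,
         l.foldl (fun s i => if H i then s + 1 else s) z) := by
  intro l
  induction l with
  | nil => intro x y z; rfl
  | cons a t ih => intro x y z; simp [List.foldl_cons, ih]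

-- A's per-pattern count over the big materialized list equals Mcnt of the short base
theorem enum_fold (base : List Int) (m : Nat) :
    ∀ (t : List Int) (k : Nat) (s : Int), k + t.length ≤ m * base.length →
      (PySem.List.enumerate t (k : Int)).foldl
        (fun s p => if PySem.List.pyGetD ((List.replicate m base).flatten) p.1 0 == p.2
                    then s + 1 else s) s
      = s + Mcnt base k t := by
  intro t
  induction t with
  | nil => intro k s _; simp [PySem.List.enumerate_nil, Mcnt]
  | cons a tl ih =>
    intro k s hk
    rw [PySem.List.enumerate_cons, List.foldl_cons]
    have hcast : ((k : Int) + 1) = ((k + 1 : Nat) : Int) := by push_cast; ring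
    rw [PySem.List.pyGetD_natCast,
        getD_flatten_replicate base 0 m k (by simp at hk; omega), hcast,
        ih (k + 1) _ (by simp at hk ⊢; omega)]
    simp only [Mcnt]
    split_ifs <;> omega

theorem countA_eq (answers base : List Int) (m : Nat)
    (hlen : answers.length ≤ m * base.length) :
    (PySem.List.pyRange 0 (answers.length : Int) 1).foldl
      (fun s i => if PySem.List.pyGetD ((List.replicate m base).flatten) i 0 ==
                     PySem.List.pyGetD answers i 0 then s + 1 else s) 0
    = Mcnt base 0 answers := by
  have key := enum_fold base m answers 0 0 (by omega)
  norm_num at key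
  rw [PySem.List.enumerate_eq_map_pyRange (d := 0), List.foldl_map] at key
  simpa [PySem.List.len_eq] using key

-- the inner dict-building loop, with symbolic key values
def mkRow (v1 v2 v3 : Int) : PySem.Dict Int (Int × Int × Int) :=
  let d := PySem.Dict.empty
  let i1 := d.getD v1 ((0 : Int), (0 : Int), (0 : Int))
  let d := d.insert v1 (i1.1 + 1, i1.2.1, i1.2.2)
  let i2 := d.getD v2 ((0 : Int), (0 : Int), (0 : Int))
  let d := d.insert v2 (i2.1, i2.2.1 + 1, i2.2.2)
  let i3 := d.getD v3 ((0 : Int), (0 : Int), (0 : Int))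
  d.insert v3 (i3.1, i3.2.1, i3.2.2 + 1)

set_option maxRecDepth 10000 in
theorem pvTable_eq_map :
    pvTable = (PySem.List.pyRange 0 40 1).map (fun j =>
      mkRow (PySem.List.pyGetD (PySem.List.pyGetD pvPats 0 []) j 0)
            (PySem.List.pyGetD (PySem.List.pyGetD pvPats 1 []) j 0)
            (PySem.List.pyGetD (PySem.List.pyGetD pvPats 2 []) j 0)) := by
  unfold pvTable
  rw [PySem.List.foldl_append_singleton_eq_map]
  apply List.map_congr_left
  intro j _
  have h3 : PySem.List.pyRange 0 3 1 = [0, 1, 2] := by decide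
  rw [h3]
  simp only [List.foldl_cons, List.foldl_nil, mkRow]
  norm_num

-- the increment triple looked up for answer a at cycle position j
def incAt (j a : Int) : Int × Int × Int :=
  match (PySem.List.pyGetD pvTable j PySem.Dict.empty).get? a with
  | none => (0, 0, 0)
  | some i => i

theorem row_get (v1 v2 v3 a : Int) :
    (match (mkRow v1 v2 v3).get? a with | none => ((0 : Int), (0 : Int), (0 : Int)) | some i => i)
    = ((if v1 == a then (1 : Int) else 0),
       (if v2 == a then (1 : Int) else 0),
       (if v3 == a then (1 : Int) else 0)) := by
  unfold mkRow
  by_cases h1 : v1 = a <;> by_cases h2 : v2 = a <;> by_cases h3 : v3 = a <;>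
    simp only [PySem.Dict.get?_insert, PySem.Dict.getD_insert, PySem.Dict.getD_empty,
      PySem.Dict.get?_empty, h1, h2, h3, if_pos, beq_iff_eq] <;>
    (try split_ifs) <;> (try norm_num) <;> simp_all

theorem rowOK (k : Nat) (a : Int) :
    incAt (((k % 40 : Nat)) : Int) a =
      ((if ([1, 2, 3, 4, 5] : List Int).getD (k % 5) 0 == a then (1 : Int) else 0),
       (if ([2, 1, 2, 3, 2, 4, 2, 5] : List Int).getD (k % 8) 0 == a then (1 : Int) else 0),
       (if ([3, 3, 1, 1, 2, 2, 4, 4, 5, 5] : List Int).getD (k % 10) 0 == a then (1 : Int) else 0)) := by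
  have hk : k % 40 < 40 := Nat.mod_lt _ (by omega)
  have hget : PySem.List.pyGetD pvTable ((k % 40 : Nat) : Int) PySem.Dict.empty
      = mkRow (PySem.List.pyGetD (PySem.List.pyGetD pvPats 0 []) ((k % 40 : Nat) : Int) 0)
              (PySem.List.pyGetD (PySem.List.pyGetD pvPats 1 []) ((k % 40 : Nat) : Int) 0)
              (PySem.List.pyGetD (PySem.List.pyGetD pvPats 2 []) ((k % 40 : Nat) : Int) 0) := by
    rw [pvTable_eq_map, PySem.List.pyGetD_natCast]
    rw [List.getD_eq_getElem _ _ (by simpa [PySem.List.length_pyRange_one] using hk),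
        List.getElem_map, PySem.List.getElem_pyRange_one]
    norm_num
  have hmod5 : k % 40 % 5 = k % 5 := Nat.mod_mod_of_dvd k (by norm_num)
  have hmod8 : k % 40 % 8 = k % 8 := Nat.mod_mod_of_dvd k (by norm_num)
  have hmod10 : k % 40 % 10 = k % 10 := Nat.mod_mod_of_dvd k (by norm_num)
  have hp0 : PySem.List.pyGetD (PySem.List.pyGetD pvPats 0 []) ((k % 40 : Nat) : Int) 0
      = ([1, 2, 3, 4, 5] : List Int).getD (k % 5) 0 := by
    rw [PySem.List.pyGetD_natCast]
    show ((List.replicate 8 [1, 2, 3, 4, 5]).flatten).getD (k % 40) 0 = _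
    rw [getD_flatten_replicate _ _ 8 (k % 40) (by simpa using hk)]
    simp [hmod5]
  have hp1 : PySem.List.pyGetD (PySem.List.pyGetD pvPats 1 []) ((k % 40 : Nat) : Int) 0
      = ([2, 1, 2, 3, 2, 4, 2, 5] : List Int).getD (k % 8) 0 := by
    rw [PySem.List.pyGetD_natCast]
    show ((List.replicate 5 [2, 1, 2, 3, 2, 4, 2, 5]).flatten).getD (k % 40) 0 = _
    rw [getD_flatten_replicate _ _ 5 (k % 40) (by simpa using hk)]
    simp [hmod8]
  have hp2 : PySem.List.pyGetD (PySem.List.pyGetD pvPats 2 []) ((k % 40 : Nat) : Int) 0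
      = ([3, 3, 1, 1, 2, 2, 4, 4, 5, 5] : List Int).getD (k % 10) 0 := by
    rw [PySem.List.pyGetD_natCast]
    show ((List.replicate 4 [3, 3, 1, 1, 2, 2, 4, 4, 5, 5]).flatten).getD (k % 40) 0 = _
    rw [getD_flatten_replicate _ _ 4 (k % 40) (by simpa using hk)]
    simp [hmod10]
  unfold incAt
  rw [hget, hp0, hp1, hp2, row_get]

-- one pvStep in terms of incAt
theorem pvStep_eq (st : (Int × Int × Int) × Int) (a : Int) :
    pvStep st a = ((st.1.1 + (incAt st.2 a).1, st.1.2.1 + (incAt st.2 a).2.1,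
                    st.1.2.2 + (incAt st.2 a).2.2),
                   if st.2 == (39 : Int) then 0 else st.2 + 1) := by
  unfold pvStep incAt
  cases h : (PySem.List.pyGetD pvTable st.2 PySem.Dict.empty).get? a <;> simp [h]

-- the scan invariant: counts are Mcnt of each base pattern, position cycles mod 40
theorem loopB (b1 b2 b3 : List Int)
    (hb1 : b1 = [1, 2, 3, 4, 5]) (hb2 : b2 = [2, 1, 2, 3, 2, 4, 2, 5])
    (hb3 : b3 = [3, 3, 1, 1, 2, 2, 4, 4, 5, 5]) :
    ∀ (t : List Int) (k : Nat) (c : Int × Int × Int),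
      t.foldl pvStep (c, ((k % 40 : Nat) : Int))
        = ((c.1 + Mcnt b1 k t, c.2.1 + Mcnt b2 k t, c.2.2 + Mcnt b3 k t),
           (((k + t.length) % 40 : Nat) : Int)) := by
  intro t
  induction t with
  | nil => intro k c; simp [Mcnt]
  | cons a tl ih =>
    intro k c
    rw [List.foldl_cons, pvStep_eq]
    have hrow := rowOK k a
    have hnext : (if (((k % 40 : Nat) : Int)) == (39 : Int) then (0 : Int) else ((k % 40 : Nat) : Int) + 1)
        = (((k + 1) % 40 : Nat) : Int) := by
      by_cases h : k % 40 = 39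
      · simp [h]; omega
      · have hne : (((k % 40 : Nat) : Int) == (39 : Int)) = false := by
          simp; omega
        rw [hne]
        simp only [Bool.false_eq_true, if_false]
        omega
    simp only at hrow ⊢
    rw [hrow, hnext, ih (k + 1) _]
    subst hb1 hb2 hb3
    simp only [Mcnt, List.length_cons, List.length_nil, Prod.mk.injEq]
    norm_num
    and_intros <;> omega

-- the common tail: pick the max and collect the 1-based indices attaining it
theorem tail_eq (x y z : Int) :
    (PySem.List.pyRange 0 3 1).foldl
      (fun ans i =>
        if PySem.List.pyGetD [x, y, z] i 0 == (PySem.List.max? [x, y, z] (fun v => v)).getD 0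
        then ans ++ [i + 1] else ans) []
    = ((PySem.List.pyRange 0 3 1).filter
        (fun s => PySem.List.pyGetD [x, y, z] s 0 ==
          (PySem.List.max? [x, y, z] (fun v => v)).getD 0)).map (fun s => s + 1) := by
  have hr : PySem.List.pyRange 0 3 1 = [0, 1, 2] := by decide
  rw [hr]
  simp only [List.foldl_cons, List.foldl_nil, List.filter_cons, List.filter_nil]
  split_ifs <;> rfl

-- ===== VERDICT (by name: the statement is the Claim_ definition above) =====
theorem solution_spec : Claim_equal_solution := by
  intro answers _ hpre
  unfold Spec_solution solution solution_alt
  simp only []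
  rw [foldl_triple_split]
  rw [countA_eq answers [1, 2, 3, 4, 5] 2000 (by simpa using hpre),
      countA_eq answers [2, 1, 2, 3, 2, 4, 2, 5] 1250 (by simpa using hpre),
      countA_eq answers [3, 3, 1, 1, 2, 2, 4, 4, 5, 5] 1000 (by simpa using hpre)]
  have hloop := loopB [1, 2, 3, 4, 5] [2, 1, 2, 3, 2, 4, 2, 5] [3, 3, 1, 1, 2, 2, 4, 4, 5, 5]
    rfl rfl rfl answers 0 (0, 0, 0)
  norm_num at hloop
  rw [hloop]
  exact tail_eq _ _ _
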